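-- pv_equiv track=rewrite | github.com/WYSyyyyyy/vulnReport | vulnReport/vuln_nessus.py | hebing
-- ===== SOURCE A (Python) =====
-- def hebing(listHe):
--     #获取列表长度
--     listHe.append(["", "", "", "", ""])
--     list_len = len(listHe)
--     #设置临时变量，作为缓冲输出
--     tmp_pluginID, tmp_name, tmp_risk, tmp_host, tmp_solution = listHe[0][0], listHe[0][1], listHe[0][2], listHe[0][3], listHe[0][4]
--     # tmp_name, tmp_risk, tmp_host, tmp_solution = listHe[0][0], listHe[0][1], listHe[0][2], listHe[0][3]
--     #接收列表
--     new_list = []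
--     #循环获取每一个漏洞，这次比较完输出上个漏洞的情况。
--     for x in range(list_len):
--         #如果漏洞id一样，则合并IP
--         if listHe[x][0] == tmp_pluginID:  #and listHe[x][1] != tmp_host
--             #如果初始ip和第一项IP一样则pass，主要针对第一个漏洞情况
--             if tmp_host != listHe[x][3]:
--
--                 tmp_host = tmp_host + "、" + listHe[x][3]
--         #输出漏洞详情和设置新的tmp_host
--         else:   # listHe[x][2] != tmp_name:  #and tmp_host1 != ""
--             new_list.append([tmp_pluginID, tmp_name, tmp_risk, tmp_host, tmp_solution])
--             tmp_host = listHe[x][3]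
--         #设置这次的漏洞与下个漏洞做比较
--         tmp_pluginID, tmp_name, tmp_risk, tmp_host, tmp_solution = listHe[x][0], listHe[x][1], listHe[x][2], tmp_host, listHe[x][4]
--     # #最后一个漏洞无法比较，要单独输出。
--     return new_list
-- ===== SOURCE B (Python) =====
-- def hebing(listHe):
--     # Same observable mutation as A: the sentinel row is appended to the caller's list.
--     listHe.append(["", "", "", "", ""])
--     # Group consecutive rows with the same pluginID.
--     groups = []
--     for row in listHe:
--         if groups and groups[-1][0][0] == row[0]:
--             groups[-1].append(row)
--         else:
--             groups.append([row])
--     # Emit one merged row per group, dropping the final (sentinel) group.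
--     out = []
--     for g in groups[:-1]:
--         acc = g[0][3]
--         for r in g[1:]:
--             if acc != r[3]:
--                 acc = acc + "、" + r[3]
--         last = g[-1]
--         out.append([g[0][0], last[1], last[2], acc, last[4]])
--     return out
-- ===== Notes on version B (the rewrite author's own statement) =====
-- stated objective: simpler
-- what changed: Replaces A's single loop carrying five buffer variables and a deferred-emit compare-with-previous-row protocol by an explicit two-phase decomposition: group consecutive rows by pluginID, then map each group (except the final sentinel group) to its merged row.
import Mathlib
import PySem

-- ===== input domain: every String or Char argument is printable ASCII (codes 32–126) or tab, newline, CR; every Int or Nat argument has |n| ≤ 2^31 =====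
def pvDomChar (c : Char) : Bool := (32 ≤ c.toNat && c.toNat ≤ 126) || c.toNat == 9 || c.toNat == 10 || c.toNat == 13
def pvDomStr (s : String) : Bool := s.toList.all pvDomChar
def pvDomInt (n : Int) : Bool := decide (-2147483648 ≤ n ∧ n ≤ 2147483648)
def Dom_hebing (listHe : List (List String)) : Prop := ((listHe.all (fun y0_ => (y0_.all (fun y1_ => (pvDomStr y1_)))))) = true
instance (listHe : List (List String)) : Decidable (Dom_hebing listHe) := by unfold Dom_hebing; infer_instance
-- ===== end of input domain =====

-- B replaces A's six-variable buffered loop by grouping consecutive equal-pluginID runs and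
-- mapping each run to its merged row ("simpler" decomposition, same cost). A also mutates its
-- argument (appends a sentinel row); the equivalence proved here is about the RETURN value only
-- (the Python B performs the same mutation).

-- row[i] for i < 5; Pre_hebing guarantees the index is in range (Python raises otherwise)
def hGet (r : List String) (i : Int) : String := (PySem.List.pyGet? r i).getD ""

-- ===== PORT A =====
-- A's loop reads listHe[x] for x = 0 .. len-1 in order; it is ported as a left fold over the
-- (sentinel-extended) list carrying A's five buffer variables and new_list.
def hebingStep (s : String × String × String × String × String × List (List String))
    (row : List String) : String × String × String × String × String × List (List String) :=
  let (pid, name, risk, host, sol, nl) := s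
  if hGet row 0 = pid then
    let host' := if host ≠ hGet row 3 then host ++ "、" ++ hGet row 3 else host
    (hGet row 0, hGet row 1, hGet row 2, host', hGet row 4, nl)
  else
    (hGet row 0, hGet row 1, hGet row 2, hGet row 3, hGet row 4,
      nl ++ [[pid, name, risk, host, sol]])

def hebing (listHe : List (List String)) : List (List String) :=
  ((listHe ++ [["", "", "", "", ""]]).foldl hebingStep
    (hGet ((listHe ++ [["", "", "", "", ""]]).headD []) 0,
     hGet ((listHe ++ [["", "", "", "", ""]]).headD []) 1,
     hGet ((listHe ++ [["", "", "", "", ""]]).headD []) 2,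
     hGet ((listHe ++ [["", "", "", "", ""]]).headD []) 3,
     hGet ((listHe ++ [["", "", "", "", ""]]).headD []) 4, [])).2.2.2.2.2

-- ===== PORT B =====
-- groups[-1] extension / new-group start of Source B
def addRow (gs : List (List (List String))) (row : List String) : List (List (List String)) :=
  match gs.getLast? with
  | some g => if hGet (g.headD []) 0 = hGet row 0
              then gs.dropLast ++ [g ++ [row]]
              else gs ++ [[row]]
  | none => [[row]]

-- host accumulation of Source B's inner loop
def hostAcc (g : List (List String)) : String :=
  (g.drop 1).foldl (fun acc r => if acc ≠ hGet r 3 then acc ++ "、" ++ hGet r 3 else acc)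
    (hGet (g.headD []) 3)

-- merged output row for one group
def emitGroup (g : List (List String)) : List String :=
  [hGet (g.headD []) 0, hGet (g.getLastD []) 1, hGet (g.getLastD []) 2,
   hostAcc g, hGet (g.getLastD []) 4]

def hebing_alt (listHe : List (List String)) : List (List String) :=
  (((listHe ++ [["", "", "", "", ""]]).foldl addRow []).dropLast).map emitGroup

-- ===== PRECONDITION & SPEC =====
-- Python A raises IndexError on any row with fewer than 5 fields; exactly those inputs are excluded.
def Pre_hebing (listHe : List (List String)) : Prop :=
  ∀ r ∈ listHe, 5 ≤ r.length
instance (listHe : List (List String)) : Decidable (Pre_hebing listHe) := by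
  unfold Pre_hebing; infer_instance

def pvWitness_hebing : List (List String) :=
  [["10", "n1", "high", "1.2.3.4", "fix"], ["10", "n1", "high", "5.6.7.8", "fix"]]

def Spec_hebing (listHe : List (List String)) (out : List (List String)) : Prop := out = hebing_alt listHe
instance (listHe : List (List String)) (out : List (List String)) : Decidable (Spec_hebing listHe out) := by unfold Spec_hebing; infer_instance

-- ===== CLAIM (what is proved, stated in full; the proofs are below) =====
def Claim_equal_hebing : Prop := ∀ (listHe : List (List String)), Dom_hebing listHe → Pre_hebing listHe → Spec_hebing listHe (hebing listHe)

-- ===== LEMMAS AND PROOFS =====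

-- HInvariant relating A's fold state to B's group list after the same nonempty prefix.
def HInv (s : String × String × String × String × String × List (List String))
    (gs : List (List (List String))) : Prop :=
  ∃ gs' g, gs = gs' ++ [g] ∧ g ≠ [] ∧
    (∀ r ∈ g, hGet r 0 = s.1) ∧
    s.2.1 = hGet (g.getLastD []) 1 ∧
    s.2.2.1 = hGet (g.getLastD []) 2 ∧
    s.2.2.2.1 = hostAcc g ∧
    s.2.2.2.2.1 = hGet (g.getLastD []) 4 ∧
    s.2.2.2.2.2 = gs'.map emitGroup

theorem hostAcc_append (g : List (List String)) (row : List String) (hg : g ≠ []) :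
    hostAcc (g ++ [row]) =
      (if hostAcc g ≠ hGet row 3 then hostAcc g ++ "、" ++ hGet row 3 else hostAcc g) := by
  obtain ⟨a, t, rfl⟩ := List.exists_cons_of_ne_nil hg
  simp [hostAcc, List.foldl_append]

theorem inv_step (s : String × String × String × String × String × List (List String))
    (gs : List (List (List String))) (row : List String)
    (h : HInv s gs) : HInv (hebingStep s row) (addRow gs row) := by
  obtain ⟨pid, name, risk, host, sol, nl⟩ := s
  obtain ⟨gs', g, rfl, hg, hkey, hname, hrisk, hhost, hsol, hnl⟩ := h
  simp only at hkey hname hrisk hhost hsol hnl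
  obtain ⟨a, t, rfl⟩ := List.exists_cons_of_ne_nil hg
  have hlast : (gs' ++ [a :: t]).getLast? = some (a :: t) := by
    simp [List.getLast?_append]
  have hhead : hGet a 0 = pid := hkey a (by simp)
  by_cases hc : hGet row 0 = pid
  · -- row extends the current group
    refine ⟨gs', (a :: t) ++ [row], ?_, by simp, ?_, ?_, ?_, ?_, ?_, ?_⟩
    · simp [addRow, hlast, hhead, hc]
    · intro r hr
      simp only [hebingStep, hc, if_pos trivial]
      rcases List.mem_append.1 hr with h1 | h1
      · exact hkey r h1
      · simp at h1; subst h1; exact hc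
    · simp [hebingStep, hc]
      rw [show a :: (t ++ [row]) = (a :: t) ++ [row] from rfl, List.getLast?_concat]
      rfl
    · simp [hebingStep, hc]
      rw [show a :: (t ++ [row]) = (a :: t) ++ [row] from rfl, List.getLast?_concat]
      rfl
    · rw [hostAcc_append (a :: t) row (by simp)]
      simp [hebingStep, hc, hhost]
    · simp [hebingStep, hc]
      rw [show a :: (t ++ [row]) = (a :: t) ++ [row] from rfl, List.getLast?_concat]
      rfl
    · simp [hebingStep, hc, hnl]
  · -- row starts a new group; the finished group is emitted
    have hc' : ¬ hGet a 0 = hGet row 0 := by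
      rw [hhead]; exact fun h => hc h.symm
    refine ⟨gs' ++ [a :: t], [row], ?_, by simp, ?_, ?_, ?_, ?_, ?_, ?_⟩
    · simp [addRow, hlast, hc']
    · intro r hr; simp at hr; subst hr; simp [hebingStep, hc]
    · simp [hebingStep, hc]
    · simp [hebingStep, hc]
    · simp [hebingStep, hc, hostAcc]
    · simp [hebingStep, hc]
    · simp [hebingStep, hc, hnl, emitGroup, hname, hrisk, hhost, hsol, hhead]

theorem inv_foldl (rest : List (List String))
    (s : String × String × String × String × String × List (List String))
    (gs : List (List (List String))) (h : HInv s gs) :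
    HInv (rest.foldl hebingStep s) (rest.foldl addRow gs) := by
  induction rest generalizing s gs with
  | nil => exact h
  | cons r t ih => exact ih _ _ (inv_step s gs r h)

-- ===== VERDICT (by name: the statement is the Claim_ definition above) =====
theorem hebing_spec : Claim_equal_hebing := by
  intro listHe _ _
  unfold Spec_hebing hebing hebing_alt
  obtain ⟨first, rest, hcons⟩ :=
    List.exists_cons_of_ne_nil (show listHe ++ [["", "", "", "", ""]] ≠ [] by simp)
  rw [hcons]
  have hfirst :
      hebingStep (hGet first 0, hGet first 1, hGet first 2, hGet first 3, hGet first 4, [])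
        first = (hGet first 0, hGet first 1, hGet first 2, hGet first 3, hGet first 4, []) := by
    simp [hebingStep]
  have hinv : HInv (hGet first 0, hGet first 1, hGet first 2, hGet first 3, hGet first 4, [])
      (addRow [] first) := by
    refine ⟨[], [first], by simp [addRow], by simp, ?_, by simp, by simp, ?_, by simp, by simp⟩
    · intro r hr; simp at hr; subst hr; rfl
    · simp [hostAcc]
  obtain ⟨gs', g, hgs, hg, _, _, _, _, _, hnl⟩ := inv_foldl rest _ _ hinv
  simp only [List.foldl_cons, List.headD_cons]
  rw [hfirst, hnl, hgs, List.dropLast_concat]
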